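-- pv_equiv track=rewrite | github.com/koruss/programming_practice | HackerRank/queensAttack.py | moveUpLeft
-- ===== SOURCE A (Python) =====
-- def moveUpLeft(n,k,r_q, c_q , obstacles):
--     count = 0
--     x = r_q +1
--     y = c_q - 1
--     while (x <=n  and y >=1):
--         if ( (x,y) ) in obstacles:
--             break
--         else:
--             count += 1
--         x +=1
--         y -=1
--     return count
-- ===== SOURCE B (Python) =====
-- def moveUpLeft(n, k, r_q, c_q, obstacles):
--     # closed-form: free run is bounded by the board edge; a single pass over
--     # obstacles finds the nearest blocker on the up-left anti-diagonal.
--     limit = min(n - r_q, c_q - 1)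
--     if limit < 0:
--         limit = 0
--     best = limit
--     s = r_q + c_q
--     for (x, y) in obstacles:
--         if x + y == s and r_q < x and x <= r_q + limit and x - r_q - 1 < best:
--             best = x - r_q - 1
--     return best
-- ===== Notes on version B (the rewrite author's own statement) =====
-- stated objective: faster
-- what changed: Replaces the step-by-step walk along the up-left diagonal (membership test per square) with a closed-form edge bound plus one pass over the obstacle list taking the nearest blocker on the anti-diagonal x+y=r_q+c_q.
import Mathlib
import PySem

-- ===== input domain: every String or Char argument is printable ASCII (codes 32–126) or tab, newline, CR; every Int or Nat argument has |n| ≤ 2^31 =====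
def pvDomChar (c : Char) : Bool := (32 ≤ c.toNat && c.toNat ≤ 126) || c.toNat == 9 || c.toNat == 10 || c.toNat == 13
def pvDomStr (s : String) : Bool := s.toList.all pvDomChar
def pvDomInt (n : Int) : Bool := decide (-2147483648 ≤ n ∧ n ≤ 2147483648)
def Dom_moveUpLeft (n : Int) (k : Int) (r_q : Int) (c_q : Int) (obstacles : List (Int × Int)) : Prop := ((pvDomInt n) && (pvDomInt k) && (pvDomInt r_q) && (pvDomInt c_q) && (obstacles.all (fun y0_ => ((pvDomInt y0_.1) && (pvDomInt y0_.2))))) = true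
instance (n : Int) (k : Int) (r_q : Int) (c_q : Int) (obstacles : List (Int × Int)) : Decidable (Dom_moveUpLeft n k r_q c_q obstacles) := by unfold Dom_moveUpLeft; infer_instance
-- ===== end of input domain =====

-- B replaces A's square-by-square walk up-left with a closed-form edge bound
-- plus one pass over the obstacle list (faster: O(|obstacles|) vs O(steps*|obstacles|)).


-- ===== PORT A =====
-- the while loop of A, with state (x, y, count); measure n - x decreases
def moveUpLeftLoop (n : Int) (obstacles : List (Int × Int)) (x y count : Int) : Int :=
  if h : x ≤ n ∧ 1 ≤ y then
    if (x, y) ∈ obstacles then count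
    else moveUpLeftLoop n obstacles (x + 1) (y - 1) (count + 1)
  else count
termination_by (n + 1 - x).toNat
decreasing_by obtain ⟨h1, _⟩ := h; omega

def moveUpLeft (n : Int) (k : Int) (r_q : Int) (c_q : Int) (obstacles : List (Int × Int)) : Int :=
  moveUpLeftLoop n obstacles (r_q + 1) (c_q - 1) 0

-- ===== PORT B =====
def moveUpLeft_alt (n : Int) (k : Int) (r_q : Int) (c_q : Int) (obstacles : List (Int × Int)) : Int :=
  let limit : Int := if min (n - r_q) (c_q - 1) < 0 then 0 else min (n - r_q) (c_q - 1)
  let s := r_q + c_q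
  obstacles.foldl
    (fun best p =>
      if p.1 + p.2 = s ∧ r_q < p.1 ∧ p.1 ≤ r_q + limit ∧ p.1 - r_q - 1 < best
      then p.1 - r_q - 1 else best)
    limit

-- ===== PRECONDITION & SPEC =====
def Spec_moveUpLeft (n : Int) (k : Int) (r_q : Int) (c_q : Int) (obstacles : List (Int × Int)) (out : Int) : Prop := out = moveUpLeft_alt n k r_q c_q obstacles
instance (n : Int) (k : Int) (r_q : Int) (c_q : Int) (obstacles : List (Int × Int)) (out : Int) : Decidable (Spec_moveUpLeft n k r_q c_q obstacles out) := by unfold Spec_moveUpLeft; infer_instance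

-- ===== CLAIM (what is proved, stated in full; the proofs are below) =====
def Claim_equal_moveUpLeft : Prop := ∀ (n : Int) (k : Int) (r_q : Int) (c_q : Int) (obstacles : List (Int × Int)), Dom_moveUpLeft n k r_q c_q obstacles → Spec_moveUpLeft n k r_q c_q obstacles (moveUpLeft n k r_q c_q obstacles)

-- ===== LEMMAS AND PROOFS =====

-- the qualifying predicate and distance for an obstacle, relative to queen (r_q,c_q) and bound `limit`
def pvQual (r_q c_q limit : Int) (p : Int × Int) : Bool :=
  (p.1 + p.2 == r_q + c_q) && (decide (r_q < p.1)) && (decide (p.1 ≤ r_q + limit))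

theorem pvQual_eq (r_q c_q limit : Int) (p : Int × Int) :
    pvQual r_q c_q limit p = true ↔ (p.1 + p.2 = r_q + c_q ∧ r_q < p.1 ∧ p.1 ≤ r_q + limit) := by
  simp [pvQual, and_assoc]

-- common reference value: foldr of min over qualifying distances, seeded with limit
def pvS (r_q c_q limit : Int) (l : List (Int × Int)) : Int :=
  l.foldr (fun p acc => if pvQual r_q c_q limit p then min (p.1 - r_q - 1) acc else acc) limit

theorem pvS_cons (r_q c_q limit : Int) (p : Int × Int) (l : List (Int × Int)) :
    pvS r_q c_q limit (p :: l) =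
      if pvQual r_q c_q limit p then min (p.1 - r_q - 1) (pvS r_q c_q limit l)
      else pvS r_q c_q limit l := rfl

theorem pvFoldr_min (r_q c_q limit : Int) (l : List (Int × Int)) (a b : Int) :
    l.foldr (fun p acc => if pvQual r_q c_q limit p then min (p.1 - r_q - 1) acc else acc) (min a b)
      = min (l.foldr (fun p acc => if pvQual r_q c_q limit p then min (p.1 - r_q - 1) acc else acc) a) b := by
  induction l with
  | nil => rfl
  | cons c l ih =>
    simp only [List.foldr, ih]
    split_ifs with h
    · omega
    · rfl

-- B's foldl equals the foldr reference
theorem pvFoldl_eq_pvS (r_q c_q limit : Int) (l : List (Int × Int)) (init : Int) :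
    l.foldl
      (fun best p =>
        if p.1 + p.2 = r_q + c_q ∧ r_q < p.1 ∧ p.1 ≤ r_q + limit ∧ p.1 - r_q - 1 < best
        then p.1 - r_q - 1 else best) init
    = l.foldr (fun p acc => if pvQual r_q c_q limit p then min (p.1 - r_q - 1) acc else acc) init := by
  induction l generalizing init with
  | nil => rfl
  | cons p l ih =>
    simp only [List.foldl, List.foldr, ih]
    by_cases hq : pvQual r_q c_q limit p = true
    · have hstep : (if p.1 + p.2 = r_q + c_q ∧ r_q < p.1 ∧ p.1 ≤ r_q + limit ∧ p.1 - r_q - 1 < init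
          then p.1 - r_q - 1 else init) = min init (p.1 - r_q - 1) := by
        obtain ⟨h1, h2, h3⟩ := (pvQual_eq r_q c_q limit p).mp hq
        split_ifs with h <;> omega
      rw [hstep, pvFoldr_min, if_pos hq]
      omega
    · have hstep : (if p.1 + p.2 = r_q + c_q ∧ r_q < p.1 ∧ p.1 ≤ r_q + limit ∧ p.1 - r_q - 1 < init
          then p.1 - r_q - 1 else init) = init := by
        rw [if_neg]; intro ⟨h1, h2, h3, _⟩; exact hq ((pvQual_eq r_q c_q limit p).mpr ⟨h1, h2, h3⟩)
      rw [hstep, if_neg hq]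

theorem pvS_no_qual (r_q c_q limit : Int) (l : List (Int × Int))
    (h : ∀ p ∈ l, ¬ pvQual r_q c_q limit p = true) : pvS r_q c_q limit l = limit := by
  induction l with
  | nil => rfl
  | cons p l ih =>
    rw [pvS_cons, if_neg (h p (by simp))]
    exact ih fun q hq => h q (by simp [hq])

theorem pvS_ge (r_q c_q limit j : Int) (l : List (Int × Int))
    (hl : j ≤ limit) (h : ∀ p ∈ l, pvQual r_q c_q limit p = true → j ≤ p.1 - r_q - 1) :
    j ≤ pvS r_q c_q limit l := by
  induction l with
  | nil => exact hl
  | cons p l ih =>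
    have ihl := ih fun q hq => h q (by simp [hq])
    rw [pvS_cons]
    split_ifs with hq
    · have := h p (by simp) hq; omega
    · exact ihl

theorem pvS_le (r_q c_q limit : Int) (l : List (Int × Int)) (p : Int × Int)
    (hp : p ∈ l) (hq : pvQual r_q c_q limit p = true) : pvS r_q c_q limit l ≤ p.1 - r_q - 1 := by
  induction l with
  | nil => cases hp
  | cons q l ih =>
    rw [pvS_cons]
    rcases List.mem_cons.mp hp with h | h
    · subst h; rw [if_pos hq]; omega
    · have := ih h
      split_ifs with hq'
      · omega
      · exact this

-- loop invariant: if no qualifying obstacle is nearer than j, the loop from step j returns pvS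
theorem loop_invariant (n r_q c_q limit : Int) (obstacles : List (Int × Int))
    (hlim : limit = if min (n - r_q) (c_q - 1) < 0 then 0 else min (n - r_q) (c_q - 1)) :
    ∀ (d : Nat) (j : Int), j = limit - (d : Int) → 0 ≤ j →
      (∀ p ∈ obstacles, pvQual r_q c_q limit p = true → j ≤ p.1 - r_q - 1) →
      moveUpLeftLoop n obstacles (r_q + 1 + j) (c_q - 1 - j) j = pvS r_q c_q limit obstacles := by
  have hb : 0 ≤ limit ∧ (limit = 0 ∨ limit = min (n - r_q) (c_q - 1)) ∧ min (n - r_q) (c_q - 1) ≤ limit := by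
    rw [hlim]; split_ifs <;> omega
  intro d
  induction d with
  | zero =>
    intro j hj _ hinv
    have hj' : j = limit := by omega
    rw [moveUpLeftLoop.eq_def]
    have hcond : ¬ (r_q + 1 + j ≤ n ∧ 1 ≤ c_q - 1 - j) := by omega
    rw [dif_neg hcond]
    rw [hj']
    refine (pvS_no_qual r_q c_q limit obstacles ?_).symm
    intro p hp hq
    have h1 := hinv p hp hq
    have := ((pvQual_eq r_q c_q limit p).mp hq).2.2
    omega
  | succ d ih =>
    intro j hj hj0 hinv
    have hjlt : j < limit := by omega
    rw [moveUpLeftLoop.eq_def]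
    have hcond : (r_q + 1 + j ≤ n ∧ 1 ≤ c_q - 1 - j) := by omega
    rw [dif_pos hcond]
    by_cases hmem : (r_q + 1 + j, c_q - 1 - j) ∈ obstacles
    · rw [if_pos hmem]
      have hq : pvQual r_q c_q limit (r_q + 1 + j, c_q - 1 - j) = true :=
        (pvQual_eq r_q c_q limit _).mpr ⟨by ring, by omega, by omega⟩
      have hle := pvS_le r_q c_q limit obstacles _ hmem hq
      have hge := pvS_ge r_q c_q limit j obstacles (by omega)
        (fun p hp hq => hinv p hp hq)
      simp only at hle
      omega
    · rw [if_neg hmem]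
      have := ih (j + 1) (by omega) (by omega) ?_
      · have heq1 : r_q + 1 + j + 1 = r_q + 1 + (j + 1) := by ring
        have heq2 : c_q - 1 - j - 1 = c_q - 1 - (j + 1) := by ring
        rw [heq1, heq2]
        exact this
      · intro p hp hq
        have h1 := hinv p hp hq
        rcases lt_or_ge j (p.1 - r_q - 1) with h | h
        · omega
        · exfalso
          have hp1 : p.1 = r_q + 1 + j := by omega
          have hp2 : p.2 = c_q - 1 - j := by
            have := ((pvQual_eq r_q c_q limit p).mp hq).1; omega
          have : p = (r_q + 1 + j, c_q - 1 - j) := Prod.ext hp1 hp2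
          exact hmem (this ▸ hp)

-- ===== VERDICT (by name: the statement is the Claim_ definition above) =====
theorem moveUpLeft_spec : Claim_equal_moveUpLeft := by
  intro n k r_q c_q obstacles _
  unfold Spec_moveUpLeft moveUpLeft moveUpLeft_alt
  set limit : Int := if min (n - r_q) (c_q - 1) < 0 then 0 else min (n - r_q) (c_q - 1) with hlim
  rw [pvFoldl_eq_pvS]
  have h0 : (0 : Int) ≤ limit := by rw [hlim]; split_ifs <;> omega
  have := loop_invariant n r_q c_q limit obstacles hlim limit.toNat 0 (by omega) le_rfl
    (fun p _ hq => by have := ((pvQual_eq r_q c_q limit p).mp hq).2.1; omega)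
  simpa using this
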